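-- pv_equiv track=rewrite | github.com/tommycet/reddit-bot | src/utils.py | get_file_extension
-- ===== SOURCE A (Python) =====
-- def get_file_extension(url):
--     if not url:
--         return None
--     url_lower = url.lower().split('?')[0]
--     for ext in ['.mp4', '.webm', '.gif', '.jpg', '.jpeg', '.png']:
--         if url_lower.endswith(ext):
--             return ext
--     return '.mp4'
-- ===== SOURCE B (Python) =====
-- _EXTS = frozenset({'.mp4', '.webm', '.gif', '.jpg', '.jpeg', '.png'})
--
-- def get_file_extension(url):
--     if not url:
--         return None
--     base = url.lower().split('?')[0]
--     cand = '.' + base.rpartition('.')[2] if '.' in base else ''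
--     return cand if cand in _EXTS else '.mp4'
-- ===== Notes on version B (the rewrite author's own statement) =====
-- stated objective: idiomatic
-- what changed: Replaces the six-way endswith loop by extracting the trailing dot-extension once (rpartition) and testing it against a frozenset, returning it on a hit and the default extension otherwise.
import Mathlib
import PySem

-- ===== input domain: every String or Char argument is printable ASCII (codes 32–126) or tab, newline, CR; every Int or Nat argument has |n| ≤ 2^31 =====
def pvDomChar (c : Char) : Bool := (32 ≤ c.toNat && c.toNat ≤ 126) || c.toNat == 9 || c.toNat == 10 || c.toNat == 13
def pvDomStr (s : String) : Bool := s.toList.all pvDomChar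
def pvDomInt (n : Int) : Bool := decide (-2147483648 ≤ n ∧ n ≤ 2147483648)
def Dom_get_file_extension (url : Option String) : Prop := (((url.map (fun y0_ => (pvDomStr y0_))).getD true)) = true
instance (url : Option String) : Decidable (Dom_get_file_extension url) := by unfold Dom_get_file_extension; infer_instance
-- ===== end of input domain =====

-- B replaces A's six-way endswith loop by extracting the trailing '.'-extension once and
-- checking it against a set (objective: idiomatic); same return value everywhere.

-- ===== PORT A =====
-- the literal list A iterates over
def pvExts : List String := [".mp4", ".webm", ".gif", ".jpg", ".jpeg", ".png"]

-- the for-loop with early return, falling through to the '.mp4' default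
def pvExtLoop (u : String) : List String → Option String
  | [] => some ".mp4"
  | e :: rest => if PySem.Str.endswith u e then some e else pvExtLoop u rest

def get_file_extension (url : Option String) : Option String :=
  match url with
  | none => none
  | some u =>
    if u = "" then none
    else
      let url_lower := ((PySem.Str.split? (PySem.Str.lower u) "?").getD []).headD ""
      pvExtLoop url_lower pvExts

-- ===== PORT B =====
-- hand port of base.rpartition('.')[2]: the segment after the last '.' (exact when '.' ∈ base,
-- the only case B uses it in)
def pvLastSeg (l : List Char) : List Char := (l.reverse.takeWhile (fun c => c ≠ '.')).reverse

-- the frozenset _EXTS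
def pvExtSet : PySem.Set String := PySem.Set.ofList [".mp4", ".webm", ".gif", ".jpg", ".jpeg", ".png"]

def get_file_extension_alt (url : Option String) : Option String :=
  match url with
  | none => none
  | some u =>
    if u = "" then none
    else
      let base := ((PySem.Str.split? (PySem.Str.lower u) "?").getD []).headD ""
      let cand := if PySem.Str.isIn "." base then String.ofList ('.' :: pvLastSeg base.toList) else ""
      if pvExtSet.contains cand then some cand else some ".mp4"

-- ===== PRECONDITION & SPEC =====
def Spec_get_file_extension (url : Option String) (out : Option String) : Prop := out = get_file_extension_alt url
instance (url : Option String) (out : Option String) : Decidable (Spec_get_file_extension url out) := by unfold Spec_get_file_extension; infer_instance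

-- ===== CLAIM (what is proved, stated in full; the proofs are below) =====
def Claim_equal_get_file_extension : Prop := ∀ (url : Option String), Dom_get_file_extension url → Spec_get_file_extension url (get_file_extension url)

-- ===== LEMMAS AND PROOFS =====

theorem pv_ofList_beq (seg t : List Char) (s : String) (hs : s.toList = '.'::t) :
    (String.ofList ('.'::seg) == s) = (seg == t) := by
  by_cases hx : seg = t
  · subst hx
    have : String.ofList ('.'::seg) = s := by
      rw [← hs]; exact String.ofList_toList
    simp [this]
  · have h1 : String.ofList ('.'::seg) ≠ s := by
      intro hc
      have h2 := congrArg String.toList hc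
      rw [String.toList_ofList, hs] at h2
      exact hx (List.cons.inj h2).2
    simp [h1, hx]

theorem pv_take_no_dot (a b : List Char) (ha : '.' ∉ a) :
    (a ++ '.'::b).takeWhile (fun c => c ≠ '.') = a := by
  induction a with
  | nil => simp
  | cons x xs ih =>
    simp only [List.mem_cons, not_or] at ha
    rw [List.cons_append, List.takeWhile_cons_of_pos (by simp; exact fun h => ha.1 h.symm),
      ih ha.2]

theorem pv_suffix_iff (l t : List Char) (ht : '.' ∉ t) :
    ('.'::t) <:+ l ↔ ('.' ∈ l ∧ l.reverse.takeWhile (fun c => c ≠ '.') = t.reverse) := by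
  constructor
  · rintro ⟨pre, rfl⟩
    constructor
    · simp
    · rw [List.reverse_append, List.reverse_cons, List.append_assoc]
      exact pv_take_no_dot _ _ (by simpa using ht)
  · rintro ⟨hmem, htw⟩
    have hr : '.' ∈ l.reverse := by simpa using hmem
    have hsplit : l.reverse.takeWhile (fun c : Char => decide (c ≠ '.')) ++
        l.reverse.dropWhile (fun c : Char => decide (c ≠ '.')) = l.reverse :=
      List.takeWhile_append_dropWhile
    have hne : l.reverse.dropWhile (fun c : Char => decide (c ≠ '.')) ≠ [] := by
      intro h0
      rw [h0, List.append_nil] at hsplit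
      rw [← hsplit] at hr
      have := List.mem_takeWhile_imp hr
      simp at this
    have hdot : (l.reverse.dropWhile (fun c : Char => decide (c ≠ '.'))).head hne = '.' := by
      have h3 := List.head_dropWhile_not (fun c : Char => decide (c ≠ '.')) hne
      simpa using h3
    refine ⟨((l.reverse.dropWhile (fun c : Char => decide (c ≠ '.'))).tail).reverse, ?_⟩
    have hL : l.reverse = t.reverse ++
        '.' :: (l.reverse.dropWhile (fun c : Char => decide (c ≠ '.'))).tail := by
      have hdt : List.dropWhile (fun c => decide (c ≠ '.')) l.reverse =
          '.' :: (List.dropWhile (fun c => decide (c ≠ '.')) l.reverse).tail := by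
        conv_lhs => rw [← List.cons_head_tail hne]
        rw [hdot]
      conv_lhs => rw [← hsplit]
      rw [htw]
      exact congrArg (t.reverse ++ ·) hdt
    have := congrArg List.reverse hL
    simpa using this.symm

theorem pv_endswith_char (b : String) (t : List Char) (e : String)
    (he : e.toList = '.'::t) (ht : '.' ∉ t) :
    PySem.Str.endswith b e = (decide ('.' ∈ b.toList) && (pvLastSeg b.toList == t)) := by
  have h1 : PySem.Str.endswith b e = PySem.Chars.endswith b.toList e.toList := by simp
  rw [h1, he]
  rcases Bool.eq_false_or_eq_true (decide ('.' ∈ b.toList) && (pvLastSeg b.toList == t)) with h | h <;> rw [h]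
  · rw [PySem.Chars.endswith_iff, pv_suffix_iff _ _ ht]
    simp only [Bool.and_eq_true, decide_eq_true_eq, beq_iff_eq] at h
    refine ⟨h.1, ?_⟩
    have := congrArg List.reverse h.2
    unfold pvLastSeg at this
    simpa using this
  · rw [Bool.eq_false_iff, Ne, PySem.Chars.endswith_iff, pv_suffix_iff _ _ ht]
    simp only [Bool.and_eq_false_iff, decide_eq_false_iff_not, beq_eq_false_iff_ne] at h
    rcases h with h | h
    · tauto
    · rintro ⟨_, h2⟩
      apply h
      unfold pvLastSeg
      rw [h2]; simp

theorem pv_isIn_dot (b : String) : PySem.Str.isIn "." b = decide ('.' ∈ b.toList) := by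
  have h1 : PySem.Str.isIn "." b = PySem.Chars.isIn ".".toList b.toList := by simp
  have h2 : (".").toList = ['.'] := by decide
  rw [h1, h2]
  by_cases h : '.' ∈ b.toList
  · rw [decide_eq_true h, PySem.Chars.isIn_iff_infix]
    obtain ⟨s, tl, hb⟩ := List.append_of_mem h
    exact ⟨s, tl, by rw [hb]; simp⟩
  · rw [decide_eq_false h, PySem.Chars.isIn_eq_false_iff]
    intro hc
    exact h (hc.mem (by simp))

theorem pvCore (b : String) :
    pvExtLoop b pvExts =
      (let cand := if PySem.Str.isIn "." b then String.ofList ('.' :: pvLastSeg b.toList) else ""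
       if pvExtSet.contains cand then some cand else some ".mp4") := by
  simp only [pvExts, pvExtLoop,
    pv_endswith_char b ['m','p','4'] ".mp4" (by decide) (by decide),
    pv_endswith_char b ['w','e','b','m'] ".webm" (by decide) (by decide),
    pv_endswith_char b ['g','i','f'] ".gif" (by decide) (by decide),
    pv_endswith_char b ['j','p','g'] ".jpg" (by decide) (by decide),
    pv_endswith_char b ['j','p','e','g'] ".jpeg" (by decide) (by decide),
    pv_endswith_char b ['p','n','g'] ".png" (by decide) (by decide),
    pv_isIn_dot b]
  by_cases hd : '.' ∈ b.toList
  · simp only [decide_eq_true hd, Bool.true_and, if_true]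
    generalize pvLastSeg b.toList = seg
    have hcont : pvExtSet.contains (String.ofList ('.' :: seg)) =
        ((seg == ['m','p','4']) || (seg == ['w','e','b','m']) || (seg == ['g','i','f']) ||
         (seg == ['j','p','g']) || (seg == ['j','p','e','g']) || (seg == ['p','n','g'])) := by
      have hset : pvExtSet = [".mp4", ".webm", ".gif", ".jpg", ".jpeg", ".png"] := by decide
      rw [hset]
      simp only [PySem.Set.contains_eq_listContains, List.contains_cons, List.contains_nil,
        pv_ofList_beq seg ['m','p','4'] ".mp4" (by decide),
        pv_ofList_beq seg ['w','e','b','m'] ".webm" (by decide),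
        pv_ofList_beq seg ['g','i','f'] ".gif" (by decide),
        pv_ofList_beq seg ['j','p','g'] ".jpg" (by decide),
        pv_ofList_beq seg ['j','p','e','g'] ".jpeg" (by decide),
        pv_ofList_beq seg ['p','n','g'] ".png" (by decide)]
      simp [Bool.or_assoc]
    rw [hcont]
    by_cases h1 : seg = ['m','p','4']
    · subst h1; decide
    by_cases h2 : seg = ['w','e','b','m']
    · subst h2; decide
    by_cases h3 : seg = ['g','i','f']
    · subst h3; decide
    by_cases h4 : seg = ['j','p','g']
    · subst h4; decide
    by_cases h5 : seg = ['j','p','e','g']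
    · subst h5; decide
    by_cases h6 : seg = ['p','n','g']
    · subst h6; decide
    simp [h1, h2, h3, h4, h5, h6]
  · have hc : "" ∉ pvExtSet := by decide
    simp [decide_eq_false hd, hc]

-- ===== VERDICT (by name: the statement is the Claim_ definition above) =====
theorem get_file_extension_spec : Claim_equal_get_file_extension := by
  intro url _
  unfold Spec_get_file_extension
  cases url with
  | none => rfl
  | some u =>
    simp only [get_file_extension, get_file_extension_alt]
    by_cases hu : u = ""
    · simp [hu]
    · simp only [if_neg hu]
      exact pvCore _
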